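-- pv_equiv track=rewrite | github.com/YuraLapin/Lab4Discrete | spf.py | restore_position
-- ===== SOURCE A (Python) =====
-- def restore_position(num, previous_array):
-- 	checked = []
-- 	flag = True
-- 	while flag:
-- 		flag = False
-- 		for arr in previous_array:
-- 			for elem in arr:
-- 				if elem not in checked:
-- 					if elem <= num:
-- 						checked.append(elem)
-- 						num += 1
-- 						flag = True
-- 	return num
-- ===== SOURCE B (Python) =====
-- def restore_position(num, previous_array):
--     for v in sorted({elem for arr in previous_array for elem in arr}):
--         if v <= num:
--             num += 1
--         else:
--             break
--     return num
-- ===== Notes on version B (the rewrite author's own statement) =====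
-- stated objective: faster
-- what changed: Replaces A's repeated full rescans of the nested array with a linear-membership checked list by one ascending pass over the sorted distinct values, incrementing num while value <= num and stopping at the first larger value.
import Mathlib
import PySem

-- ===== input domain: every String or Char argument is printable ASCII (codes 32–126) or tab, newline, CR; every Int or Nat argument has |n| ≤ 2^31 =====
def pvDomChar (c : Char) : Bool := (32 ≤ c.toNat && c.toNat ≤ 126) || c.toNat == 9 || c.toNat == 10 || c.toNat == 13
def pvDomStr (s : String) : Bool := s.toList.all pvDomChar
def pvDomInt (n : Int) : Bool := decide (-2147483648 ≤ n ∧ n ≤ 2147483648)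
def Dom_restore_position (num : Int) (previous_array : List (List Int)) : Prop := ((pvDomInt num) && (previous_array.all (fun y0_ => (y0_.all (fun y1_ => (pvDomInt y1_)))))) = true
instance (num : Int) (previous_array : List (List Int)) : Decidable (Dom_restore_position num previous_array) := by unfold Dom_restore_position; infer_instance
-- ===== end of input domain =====

-- B replaces A's repeated rescans of the whole nested array with a single ascending
-- pass over the sorted distinct values (objective: faster).

-- ===== PORT A =====
-- one element step of A's innermost loop body: state = (checked, num, flag)
def passElem (st : List Int × Int × Bool) (elem : Int) : List Int × Int × Bool :=
  if elem ∈ st.1 then st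
  else if elem ≤ st.2.1 then (st.1 ++ [elem], st.2.1 + 1, true)
  else st

-- A's 'while flag' loop; fuel is only a termination guard (proved never exhausted)
def loopA (prev : List (List Int)) : Nat → List Int → Int → Int
  | 0, _, num => num
  | fuel+1, checked, num =>
    let st := prev.foldl (fun st arr => arr.foldl passElem st) (checked, num, false)
    if st.2.2 then loopA prev fuel st.1 st.2.1 else st.2.1

def restore_position (num : Int) (previous_array : List (List Int)) : Int :=
  loopA previous_array ((previous_array.flatMap id).length + 1) [] num

-- ===== PORT B =====
-- 'for v in sorted({...}): if v <= num: num += 1 else: break'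
def goB : Int → List Int → Int
  | num, [] => num
  | num, v :: rest => if v ≤ num then goB (num + 1) rest else num

def restore_position_alt (num : Int) (previous_array : List (List Int)) : Int :=
  goB num (PySem.List.sorted (PySem.Set.ofList (previous_array.flatMap id)) (fun x => x) false)

-- ===== PRECONDITION & SPEC =====
def Spec_restore_position (num : Int) (previous_array : List (List Int)) (out : Int) : Prop := out = restore_position_alt num previous_array
instance (num : Int) (previous_array : List (List Int)) (out : Int) : Decidable (Spec_restore_position num previous_array out) := by unfold Spec_restore_position; infer_instance

-- ===== CLAIM (what is proved, stated in full; the proofs are below) =====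
def Claim_equal_restore_position : Prop := ∀ (num : Int) (previous_array : List (List Int)), Dom_restore_position num previous_array → Spec_restore_position num previous_array (restore_position num previous_array)

-- ===== LEMMAS AND PROOFS =====

-- a nodup list of elements of T that are all ≤ r' is no longer than the filter's card
lemma len_le_card (T : Finset Int) (r' : Int) (c : List Int) (h1 : c.Nodup)
    (h2 : ∀ x ∈ c, x ∈ T) (h3 : ∀ x ∈ c, x ≤ r') :
    (c.length : Int) ≤ ((T.filter (fun v => v ≤ r')).card : Int) := by
  have hsub : c.toFinset ⊆ T.filter (fun v => v ≤ r') := by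
    intro x hx
    have hx' := List.mem_toFinset.mp hx
    exact Finset.mem_filter.mpr ⟨h2 x hx', h3 x hx'⟩
  have hle := Finset.card_le_card hsub
  have hcard : c.toFinset.card = c.length := List.toFinset_card_of_nodup h1
  omega

-- the nested for-loops are one fold over the flattened list
lemma nested_eq (prev : List (List Int)) (st : List Int × Int × Bool) :
    prev.foldl (fun st arr => arr.foldl passElem st) st = (prev.flatMap id).foldl passElem st := by
  induction prev generalizing st with
  | nil => rfl
  | cons a t ih => simp [List.foldl_append, ih]

-- all invariants of one pass of A's inner loops
lemma fold_pass (T : Finset Int) (num0 r' : Int)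
    (hr : r' = num0 + ((T.filter (fun v => v ≤ r')).card : Int)) :
    ∀ (l checked : List Int) (num : Int) (flag : Bool),
      (∀ e ∈ l, e ∈ T) →
      checked.Nodup → (∀ c ∈ checked, c ∈ T) → (∀ c ∈ checked, c ≤ num) →
      num = num0 + (checked.length : Int) → num ≤ r' →
      ((l.foldl passElem (checked, num, flag)).1.Nodup ∧
       (∀ c ∈ (l.foldl passElem (checked, num, flag)).1, c ∈ T) ∧
       (∀ c ∈ (l.foldl passElem (checked, num, flag)).1, c ≤ (l.foldl passElem (checked, num, flag)).2.1) ∧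
       (l.foldl passElem (checked, num, flag)).2.1 = num0 + ((l.foldl passElem (checked, num, flag)).1.length : Int) ∧
       (l.foldl passElem (checked, num, flag)).2.1 ≤ r' ∧
       checked.length ≤ (l.foldl passElem (checked, num, flag)).1.length ∧
       ((l.foldl passElem (checked, num, flag)).2.2 = false →
          (l.foldl passElem (checked, num, flag)).1 = checked ∧
          (l.foldl passElem (checked, num, flag)).2.1 = num ∧ flag = false ∧
          ∀ e ∈ l, e ∈ checked ∨ ¬ e ≤ num) ∧
       (flag = false → (l.foldl passElem (checked, num, flag)).2.2 = true →
          checked.length < (l.foldl passElem (checked, num, flag)).1.length)) := by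
  intro l
  induction l with
  | nil =>
    intro checked num flag hT h1 h2 h3 h4 h5
    refine ⟨h1, h2, h3, h4, h5, le_refl _, ?_, ?_⟩
    · intro hf; exact ⟨rfl, rfl, by simpa using hf, by simp⟩
    · intro hf hf'; rw [List.foldl_nil] at hf'; simp [hf] at hf'
  | cons e rest ih =>
    intro checked num flag hT h1 h2 h3 h4 h5
    have heT : e ∈ T := hT e (List.mem_cons_self)
    have hTrest : ∀ x ∈ rest, x ∈ T := fun x hx => hT x (List.mem_cons_of_mem _ hx)
    by_cases he : e ∈ checked
    · simp only [List.foldl_cons, passElem, if_pos he]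
      obtain ⟨A1, A2, A3, A4, A5, A6, A7, A8⟩ := ih checked num flag hTrest h1 h2 h3 h4 h5
      refine ⟨A1, A2, A3, A4, A5, A6, ?_, A8⟩
      intro hf
      obtain ⟨B1, B2, B3, B4⟩ := A7 hf
      refine ⟨B1, B2, B3, ?_⟩
      intro x hx
      rcases List.mem_cons.mp hx with h | h
      · exact Or.inl (h ▸ he)
      · exact B4 x h
    · by_cases hle : e ≤ num
      · simp only [List.foldl_cons, passElem, if_neg he, if_pos hle]
        have h1' : (checked ++ [e]).Nodup := by
          simp only [List.nodup_append, List.nodup_singleton, true_and]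
          refine ⟨h1, ?_⟩
          intro a ha b hb
          simp at hb
          subst hb
          exact fun h => he (h ▸ ha)
        have h2' : ∀ c ∈ checked ++ [e], c ∈ T := by
          intro c hc
          rcases List.mem_append.mp hc with h | h
          · exact h2 c h
          · simp at h; exact h ▸ heT
        have h3' : ∀ c ∈ checked ++ [e], c ≤ num + 1 := by
          intro c hc
          rcases List.mem_append.mp hc with h | h
          · exact le_trans (h3 c h) (by omega)
          · simp at h; omega
        have h4' : num + 1 = num0 + (((checked ++ [e]).length : Nat) : Int) := by
          simp [List.length_append]; omega
        have h5' : num + 1 ≤ r' := by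
          have hcle : ∀ c ∈ checked ++ [e], c ≤ r' := by
            intro c hc
            rcases List.mem_append.mp hc with h | h
            · exact le_trans (h3 c h) h5
            · simp at h; omega
          have := len_le_card T r' (checked ++ [e]) h1' h2' hcle
          simp [List.length_append] at this
          omega
        obtain ⟨A1, A2, A3, A4, A5, A6, A7, A8⟩ :=
          ih (checked ++ [e]) (num + 1) true hTrest h1' h2' h3' h4' h5'
        refine ⟨A1, A2, A3, A4, A5, ?_, ?_, ?_⟩
        · have : (checked ++ [e]).length ≤ _ := A6
          simp [List.length_append] at this
          omega
        · intro hf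
          exact absurd (A7 hf).2.2.1 (by simp)
        · intro _ _
          have : (checked ++ [e]).length ≤ _ := A6
          simp [List.length_append] at this
          omega
      · simp only [List.foldl_cons, passElem, if_neg he, if_neg hle]
        obtain ⟨A1, A2, A3, A4, A5, A6, A7, A8⟩ := ih checked num flag hTrest h1 h2 h3 h4 h5
        refine ⟨A1, A2, A3, A4, A5, A6, ?_, A8⟩
        intro hf
        obtain ⟨B1, B2, B3, B4⟩ := A7 hf
        refine ⟨B1, B2, B3, ?_⟩
        intro x hx
        rcases List.mem_cons.mp hx with h | h
        · exact Or.inr (h ▸ hle)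
        · exact B4 x h

-- A's loop computes a solution of the fixpoint equation, and stays below any solution r'
lemma loopA_main (prev : List (List Int)) (num0 r' : Int)
    (hr : r' = num0 + (((prev.flatMap id).toFinset.filter (fun v => v ≤ r')).card : Int)) :
    ∀ (fuel : Nat) (checked : List Int) (num : Int),
      checked.Nodup → (∀ c ∈ checked, c ∈ (prev.flatMap id).toFinset) →
      (∀ c ∈ checked, c ≤ num) →
      num = num0 + (checked.length : Int) → num ≤ r' →
      (prev.flatMap id).toFinset.card < fuel + checked.length →
      (num0 ≤ loopA prev fuel checked num ∧
       loopA prev fuel checked num =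
         num0 + (((prev.flatMap id).toFinset.filter (fun v => v ≤ loopA prev fuel checked num)).card : Int) ∧
       loopA prev fuel checked num ≤ r') := by
  intro fuel
  induction fuel with
  | zero =>
    intro checked num h1 h2 h3 h4 h5 hfuel
    exfalso
    have hsub : checked.toFinset ⊆ (prev.flatMap id).toFinset := by
      intro x hx; exact h2 x (List.mem_toFinset.mp hx)
    have := Finset.card_le_card hsub
    have hcard : checked.toFinset.card = checked.length := List.toFinset_card_of_nodup h1
    omega
  | succ fuel ih =>
    intro checked num h1 h2 h3 h4 h5 hfuel
    have hTL : ∀ e ∈ prev.flatMap id, e ∈ (prev.flatMap id).toFinset := fun e he => List.mem_toFinset.mpr he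
    obtain ⟨A1, A2, A3, A4, A5, A6, A7, A8⟩ :=
      fold_pass (prev.flatMap id).toFinset num0 r' hr (prev.flatMap id) checked num false
        hTL h1 h2 h3 h4 h5
    by_cases hf : ((prev.flatMap id).foldl passElem (checked, num, false)).2.2 = true
    · have hres : loopA prev (fuel + 1) checked num =
          loopA prev fuel ((prev.flatMap id).foldl passElem (checked, num, false)).1
            ((prev.flatMap id).foldl passElem (checked, num, false)).2.1 := by
        simp only [loopA, nested_eq]
        rw [if_pos hf]
      have hlt := A8 rfl hf
      rw [hres]
      exact ih _ _ A1 A2 A3 A4 A5 (by omega)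
    · have hff : ((prev.flatMap id).foldl passElem (checked, num, false)).2.2 = false := by
        simpa using hf
      obtain ⟨B1, B2, B3, B4⟩ := A7 hff
      have hres : loopA prev (fuel + 1) checked num = num := by
        simp only [loopA, nested_eq]
        rw [if_neg (by rw [hff]; decide), B2]
      rw [hres]
      have hset : (prev.flatMap id).toFinset.filter (fun v => v ≤ num) = checked.toFinset := by
        apply Finset.ext
        intro x
        constructor
        · intro hx
          obtain ⟨hxT, hxle⟩ := Finset.mem_filter.mp hx
          rcases B4 x (List.mem_toFinset.mp hxT) with h | h
          · exact List.mem_toFinset.mpr h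
          · exact absurd hxle h
        · intro hx
          have hx' := List.mem_toFinset.mp hx
          exact Finset.mem_filter.mpr ⟨h2 x hx', h3 x hx'⟩
      have hcard : checked.toFinset.card = checked.length := List.toFinset_card_of_nodup h1
      refine ⟨by omega, ?_, h5⟩
      rw [hset, hcard]
      exact h4

-- B's scan computes a solution of the fixpoint equation …
lemma goB_sol : ∀ (xs : List Int) (num : Int), xs.Pairwise (· < ·) →
    num ≤ goB num xs ∧
    goB num xs = num + ((xs.toFinset.filter (fun v => v ≤ goB num xs)).card : Int) := by
  intro xs
  induction xs with
  | nil => intro num _; simp [goB]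
  | cons v rest ih =>
    intro num hp
    have hpr := (List.pairwise_cons.mp hp).2
    have hvlt := (List.pairwise_cons.mp hp).1
    have hvnotin : v ∉ rest.toFinset := by
      intro h
      exact absurd rfl (ne_of_lt (hvlt v (List.mem_toFinset.mp h)))
    by_cases hle : v ≤ num
    · simp only [goB, if_pos hle]
      obtain ⟨H1, H2⟩ := ih (num + 1) hpr
      have hvle : v ≤ goB (num + 1) rest := by omega
      constructor
      · omega
      · rw [List.toFinset_cons, Finset.filter_insert, if_pos hvle,
          Finset.card_insert_of_notMem (fun h => hvnotin (Finset.mem_of_mem_filter v h))]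
        push_cast
        omega
    · simp only [goB, if_neg hle]
      have : (v :: rest).toFinset.filter (fun x => x ≤ num) = ∅ := by
        apply Finset.eq_empty_of_forall_notMem
        intro x hx
        obtain ⟨hxT, hxle⟩ := Finset.mem_filter.mp hx
        rcases List.mem_cons.mp (List.mem_toFinset.mp hxT) with h | h
        · exact hle (h ▸ hxle)
        · have := hvlt x h; omega
      refine ⟨le_refl _, ?_⟩
      rw [this]
      simp
-- … and stays below any solution
lemma goB_min : ∀ (xs : List Int) (num r' : Int), xs.Pairwise (· < ·) → num ≤ r' →
    r' = num + ((xs.toFinset.filter (fun v => v ≤ r')).card : Int) → goB num xs ≤ r' := by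
  intro xs
  induction xs with
  | nil => intro num r' _ h5 _; simpa [goB] using h5
  | cons v rest ih =>
    intro num r' hp h5 hr
    have hpr := (List.pairwise_cons.mp hp).2
    have hvlt := (List.pairwise_cons.mp hp).1
    have hvnotin : v ∉ rest.toFinset := by
      intro h
      exact absurd rfl (ne_of_lt (hvlt v (List.mem_toFinset.mp h)))
    by_cases hle : v ≤ num
    · simp only [goB, if_pos hle]
      have hvler : v ≤ r' := by omega
      rw [List.toFinset_cons, Finset.filter_insert, if_pos hvler,
        Finset.card_insert_of_notMem (fun h => hvnotin (Finset.mem_of_mem_filter v h))] at hr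
      push_cast at hr
      apply ih (num + 1) r' hpr (by omega) (by omega)
    · simp only [goB, if_neg hle]
      exact h5

-- ===== VERDICT (by name: the statement is the Claim_ definition above) =====
theorem restore_position_spec : Claim_equal_restore_position := by
  intro num prev _
  unfold Spec_restore_position restore_position restore_position_alt
  set L := prev.flatMap id with hL
  set xs := PySem.List.sorted (PySem.Set.ofList L) (fun x => x) false with hxs
  have hpw : xs.Pairwise (· < ·) := PySem.List.sorted_ofList_pairwise_lt L
  have hTeq : xs.toFinset = L.toFinset := by
    apply Finset.ext
    intro x
    simp only [List.mem_toFinset, hxs, PySem.List.mem_sorted, PySem.Set.mem_ofList]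
  obtain ⟨hB1, hB2⟩ := goB_sol xs num hpw
  rw [hTeq] at hB2
  obtain ⟨hA1, hA2, hA3⟩ :=
    loopA_main prev num (goB num xs) hB2 (L.length + 1) [] num
      List.nodup_nil (by simp) (by simp) (by simp) hB1
      (by simp only [List.length_nil, Nat.add_zero]; exact Nat.lt_succ_of_le (List.toFinset_card_le L))
  have hBA : goB num xs ≤ loopA prev (L.length + 1) [] num := by
    apply goB_min xs num _ hpw hA1
    rw [hTeq]
    exact hA2
  omega
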